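-- pv_equiv track=rewrite | github.com/Grigoriy1988/EGE | 23 задание/10/1.py | f
-- ===== SOURCE A (Python) =====
-- def f(c,e,f1=False,f2=True):
--     if c == 25:
--         f1 = True
--     if c == 6:
--         f2=False
--     if c > e:
--         return 0
--     if c == e:
--         return f1*f2
--     if c<e:
--         return f(c+2,e,f1,f2)+f(c*3,e,f1,f2)
-- ===== SOURCE B (Python) =====
-- def f(c, e, f1=False, f2=True):
--     # Bottom-up dynamic programme: W[(v, a, b)] = number of successful paths
--     # from v to e given incoming flags a (25 seen) and b (6 not seen yet).
--     W = {}
--     for v in range(e, c - 1, -1):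
--         for a in (False, True):
--             for b in (False, True):
--                 na = a or v == 25
--                 nb = b and v != 6
--                 if v == e:
--                     W[(v, a, b)] = 1 if na and nb else 0
--                 else:
--                     W[(v, a, b)] = W.get((v + 2, na, nb), 0) + W.get((v * 3, na, nb), 0)
--     return W.get((c, f1, f2), 0)
-- ===== Notes on version B (the rewrite author's own statement) =====
-- stated objective: faster
-- what changed: replaces the exponential two-branch recursion by a bottom-up dynamic-programming table over the values e..c with the two flags as part of the state
import Mathlib
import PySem

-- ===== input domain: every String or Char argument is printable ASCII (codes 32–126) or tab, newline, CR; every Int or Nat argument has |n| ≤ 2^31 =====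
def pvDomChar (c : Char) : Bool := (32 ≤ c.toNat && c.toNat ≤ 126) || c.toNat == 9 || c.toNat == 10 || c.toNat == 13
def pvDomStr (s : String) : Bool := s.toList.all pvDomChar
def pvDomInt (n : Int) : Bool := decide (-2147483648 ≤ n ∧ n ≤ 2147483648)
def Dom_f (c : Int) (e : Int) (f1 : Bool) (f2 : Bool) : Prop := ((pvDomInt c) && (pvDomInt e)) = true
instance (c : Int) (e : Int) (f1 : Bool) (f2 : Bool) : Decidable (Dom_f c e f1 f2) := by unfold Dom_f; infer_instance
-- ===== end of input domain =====

-- B replaces A's exponential two-branch recursion by a bottom-up DP table over the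
-- values e..c keyed by (value, flag1, flag2).

-- ===== PORT A =====
-- A is a literal recursion; it diverges when c ≤ 0 ∧ c < e (excluded by Pre_f), so the
-- port threads a fuel argument that is provably sufficient on Pre_f (fuel exhaustion → 0).
def fRec : Nat → Int → Int → Bool → Bool → Int
  | 0, _, _, _, _ => 0
  | fuel+1, c, e, f1, f2 =>
    let f1 := if c = 25 then true else f1
    let f2 := if c = 6 then false else f2
    if c > e then 0
    else if c = e then (if f1 && f2 then 1 else 0)
    else fRec fuel (c+2) e f1 f2 + fRec fuel (c*3) e f1 f2

def f (c : Int) (e : Int) (f1 : Bool) (f2 : Bool) : Int :=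
  fRec ((e - c).toNat + 1) c e f1 f2

-- ===== PORT B =====
-- one cell of the DP table: the body of the innermost Python loop
def fCell (e : Int) (v : Int) (W : PySem.Dict (Int × Bool × Bool) Int) (a b : Bool) :
    PySem.Dict (Int × Bool × Bool) Int :=
  let na := a || decide (v = 25)
  let nb := b && !decide (v = 6)
  if v = e then W.insert (v, a, b) (if na && nb then 1 else 0)
  else W.insert (v, a, b) (W.getD (v+2, na, nb) 0 + W.getD (v*3, na, nb) 0)

-- the two nested flag loops for one value v
def fStep (e : Int) (W : PySem.Dict (Int × Bool × Bool) Int) (v : Int) :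
    PySem.Dict (Int × Bool × Bool) Int :=
  [false, true].foldl (fun W a => [false, true].foldl (fun W b => fCell e v W a b) W) W

def f_alt (c : Int) (e : Int) (f1 : Bool) (f2 : Bool) : Int :=
  let W := (PySem.List.pyRange e (c-1) (-1)).foldl (fStep e) PySem.Dict.empty
  W.getD (c, f1, f2) 0

-- ===== PRECONDITION & SPEC =====
-- Pre_f excludes exactly the inputs c ≤ 0 ∧ c < e, on which the Python A recurses
-- forever through the c*3 branch (RecursionError); A returns normally everywhere else.
def Pre_f (c : Int) (e : Int) (f1 : Bool) (f2 : Bool) : Prop := 1 ≤ c ∨ e ≤ c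
instance (c : Int) (e : Int) (f1 : Bool) (f2 : Bool) : Decidable (Pre_f c e f1 f2) := by
  unfold Pre_f; infer_instance

def pvWitness_f : Int × Int × Bool × Bool := (1, 12, false, true)

def Spec_f (c : Int) (e : Int) (f1 : Bool) (f2 : Bool) (out : Int) : Prop := out = f_alt c e f1 f2
instance (c : Int) (e : Int) (f1 : Bool) (f2 : Bool) (out : Int) : Decidable (Spec_f c e f1 f2 out) := by
  unfold Spec_f; infer_instance

-- ===== CLAIM (what is proved, stated in full; the proofs are below) =====
def Claim_equal_f : Prop := ∀ (c : Int) (e : Int) (f1 : Bool) (f2 : Bool),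
  Dom_f c e f1 f2 → Pre_f c e f1 f2 → Spec_f c e f1 f2 (f c e f1 f2)

-- ===== LEMMAS AND PROOFS =====

-- fuel independence of A's port on the terminating region
theorem fRec_fuel_eq (m : Nat) : ∀ (n : Nat) (c e : Int) (f1 f2 : Bool),
    (e - c).toNat < m → (e - c).toNat < n → 1 ≤ c →
    fRec m c e f1 f2 = fRec n c e f1 f2 := by
  induction m with
  | zero => intro n c e f1 f2 hm; omega
  | succ m ih =>
    intro n c e f1 f2 hm hn hc
    cases n with
    | zero => omega
    | succ n =>
      simp only [fRec]
      by_cases hgt : c > e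
      · simp [hgt]
      · simp only [hgt, if_false]
        by_cases heq : c = e
        · simp [heq]
        · rw [ih n (c+2) e _ _ (by omega) (by omega) (by omega),
              ih n (c*3) e _ _ (by omega) (by omega) (by omega)]

theorem fRec_canon (m : Nat) (c e : Int) (f1 f2 : Bool)
    (hm : (e - c).toNat < m) (hc : 1 ≤ c) : fRec m c e f1 f2 = f c e f1 f2 :=
  fRec_fuel_eq m ((e - c).toNat + 1) c e f1 f2 hm (by omega) hc

-- A's recurrence, phrased at canonical fuel
theorem f_of_gt (c e : Int) (f1 f2 : Bool) (h : e < c) : f c e f1 f2 = 0 := by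
  simp only [f, fRec]
  simp [h]

theorem f_of_eq (e : Int) (f1 f2 : Bool) :
    f e e f1 f2 = (if (f1 || decide (e = 25)) && (f2 && !decide (e = 6)) then 1 else 0) := by
  simp only [f, fRec]
  by_cases h25 : e = 25 <;> by_cases h6 : e = 6 <;> simp_all

theorem f_of_lt (c e : Int) (f1 f2 : Bool) (hc : 1 ≤ c) (h : c < e) :
    f c e f1 f2 = f (c+2) e (f1 || decide (c = 25)) (f2 && !decide (c = 6))
                + f (c*3) e (f1 || decide (c = 25)) (f2 && !decide (c = 6)) := by
  have hne : ¬ c = e := by omega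
  have hgt : ¬ c > e := by omega
  show fRec ((e - c).toNat + 1) c e f1 f2 = _
  conv_lhs => rw [fRec]
  simp only [hgt, hne, if_false]
  rw [fRec_canon _ _ _ _ _ (by omega) (by omega),
      fRec_canon _ _ _ _ _ (by omega) (by omega)]
  by_cases h25 : c = 25 <;> by_cases h6 : c = 6 <;> simp_all

-- the loop invariant: the table holds exactly A's values for lo < u ≤ e
def TblInv (e lo : Int) (W : PySem.Dict (Int × Bool × Bool) Int) : Prop :=
  ∀ (u : Int) (a b : Bool),
    W.get? (u, a, b) = if lo < u ∧ u ≤ e then some (f u e a b) else none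

-- the invariant off the row v (the part a cell at v cannot disturb)
def TblInvOff (e v : Int) (W : PySem.Dict (Int × Bool × Bool) Int) : Prop :=
  ∀ (u : Int) (a b : Bool), u ≠ v →
    W.get? (u, a, b) = if v < u ∧ u ≤ e then some (f u e a b) else none

theorem cell_get?_ne (e v : Int) (W : PySem.Dict (Int × Bool × Bool) Int)
    (a' b' : Bool) (u : Int) (a b : Bool) (hu : u ≠ v) :
    (fCell e v W a' b').get? (u, a, b) = W.get? (u, a, b) := by
  have hne : ((u : Int), a, b) ≠ ((v : Int), a', b') := by
    intro h; exact hu (congrArg Prod.fst h)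
  unfold fCell
  split <;> rw [PySem.Dict.get?_insert_of_ne _ _ hne]

theorem cell_invOff (e v : Int) (W : PySem.Dict (Int × Bool × Bool) Int)
    (a' b' : Bool) (h : TblInvOff e v W) : TblInvOff e v (fCell e v W a' b') := by
  intro u a b hu
  rw [cell_get?_ne e v W a' b' u a b hu]
  exact h u a b hu

theorem cell_hit (e v : Int) (W : PySem.Dict (Int × Bool × Bool) Int) (a b : Bool)
    (hv : v ≤ e) (hv1 : 1 ≤ v ∨ v = e) (hW : TblInvOff e v W) :
    (fCell e v W a b).get? (v, a, b) = some (f v e a b) := by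
  unfold fCell
  by_cases he : v = e
  · subst he
    simp [PySem.Dict.get?_insert_self, f_of_eq]
  · have hvlt : v < e := by omega
    have hv1' : 1 ≤ v := by omega
    simp only [he, if_false, PySem.Dict.get?_insert_self]
    have g2 : W.getD (v+2, a || decide (v = 25), b && !decide (v = 6)) 0
        = f (v+2) e (a || decide (v = 25)) (b && !decide (v = 6)) := by
      rw [PySem.Dict.getD_eq_get?_getD, hW (v+2) _ _ (by omega)]
      by_cases h2 : v + 2 ≤ e
      · simp [h2, show v < v + 2 by omega]
      · have hc : ¬ (v < v + 2 ∧ v + 2 ≤ e) := by omega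
        simp [h2, f_of_gt _ _ _ _ (show e < v + 2 by omega)]
    have g3 : W.getD (v*3, a || decide (v = 25), b && !decide (v = 6)) 0
        = f (v*3) e (a || decide (v = 25)) (b && !decide (v = 6)) := by
      rw [PySem.Dict.getD_eq_get?_getD, hW (v*3) _ _ (by omega)]
      by_cases h3 : v * 3 ≤ e
      · simp [h3, show v < v * 3 by omega]
      · have hc : ¬ (v < v * 3 ∧ v * 3 ≤ e) := by omega
        simp [h3, f_of_gt _ _ _ _ (show e < v * 3 by omega)]
    rw [g2, g3, f_of_lt v e a b hv1' hvlt]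

theorem cell_miss (e v : Int) (W : PySem.Dict (Int × Bool × Bool) Int)
    (a' b' a b : Bool) (h : (a, b) ≠ (a', b')) :
    (fCell e v W a' b').get? (v, a, b) = W.get? (v, a, b) := by
  have hne : ((v : Int), a, b) ≠ ((v : Int), a', b') := by
    intro hh
    exact h (congrArg Prod.snd hh)
  unfold fCell
  split <;> rw [PySem.Dict.get?_insert_of_ne _ _ hne]

theorem fStep_inv (e v : Int) (W : PySem.Dict (Int × Bool × Bool) Int)
    (hv : v ≤ e) (hv1 : 1 ≤ v ∨ v = e) (hW : TblInv e v W) :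
    TblInv e (v-1) (fStep e W v) := by
  have hOff0 : TblInvOff e v W := fun u a b _ => hW u a b
  have hOff1 := cell_invOff e v W false false hOff0
  have hOff2 := cell_invOff e v _ false true hOff1
  have hOff3 := cell_invOff e v _ true false hOff2
  intro u a b
  show (fCell e v (fCell e v (fCell e v (fCell e v W false false) false true) true false) true true).get? (u, a, b) = _
  by_cases hu : u = v
  · subst hu
    rw [if_pos (show u - 1 < u ∧ u ≤ e from ⟨by omega, hv⟩)]
    cases a <;> cases b
    · rw [cell_miss _ _ _ _ _ _ _ (by decide), cell_miss _ _ _ _ _ _ _ (by decide),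
          cell_miss _ _ _ _ _ _ _ (by decide), cell_hit e u W false false hv hv1 hOff0]
    · rw [cell_miss _ _ _ _ _ _ _ (by decide), cell_miss _ _ _ _ _ _ _ (by decide),
          cell_hit e u _ false true hv hv1 hOff1]
    · rw [cell_miss _ _ _ _ _ _ _ (by decide),
          cell_hit e u _ true false hv hv1 hOff2]
    · rw [cell_hit e u _ true true hv hv1 hOff3]
  · rw [cell_get?_ne _ _ _ _ _ _ _ _ hu, cell_get?_ne _ _ _ _ _ _ _ _ hu,
        cell_get?_ne _ _ _ _ _ _ _ _ hu, cell_get?_ne _ _ _ _ _ _ _ _ hu]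
    rw [hW u a b]
    by_cases hcnd : u ≤ e
    · by_cases hlt : v < u
      · rw [if_pos ⟨hlt, hcnd⟩, if_pos ⟨by omega, hcnd⟩]
      · rw [if_neg (by omega), if_neg (by omega)]
    · rw [if_neg (by omega), if_neg (by omega)]

-- processing the rest of the countdown range preserves/extends the invariant
theorem loop_inv (e c : Int) (hc : 1 ≤ c ∨ c = e) :
    ∀ (n : Nat) (v : Int), v = c - 1 + n → v ≤ e →
    ∀ (W : PySem.Dict (Int × Bool × Bool) Int), TblInv e v W →
    TblInv e (c-1) ((PySem.List.pyRange v (c-1) (-1)).foldl (fStep e) W) := by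
  intro n
  induction n with
  | zero =>
    intro v hveq hve W hW
    rw [PySem.List.pyRange_neg_one_eq_nil (by omega)]
    simpa using (by rw [show c - 1 = v by omega]; exact hW)
  | succ n ih =>
    intro v hveq hve W hW
    rw [PySem.List.pyRange_neg_one_cons (by omega)]
    simp only [List.foldl_cons]
    exact ih (v-1) (by omega) (by omega) _
      (fStep_inv e v W hve (by omega) hW)

-- ===== VERDICT (by name: the statement is the Claim_ definition above) =====
theorem f_spec : Claim_equal_f := by
  intro c e f1 f2 _ hpre
  show f c e f1 f2 = f_alt c e f1 f2
  simp only [f_alt]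
  by_cases hce : c ≤ e
  · have hc : 1 ≤ c ∨ c = e := by
      rcases hpre with h | h
      · exact Or.inl h
      · exact Or.inr (by omega)
    have hInv0 : TblInv e e PySem.Dict.empty := by
      intro u a b
      have : ¬ (e < u ∧ u ≤ e) := by omega
      simp [this, PySem.Dict.get?_empty]
    have hfin := loop_inv e c hc (e - (c-1)).toNat e (by omega) (by omega)
      PySem.Dict.empty hInv0
    rw [PySem.Dict.getD_eq_get?_getD, hfin c f1 f2]
    simp [show c - 1 < c ∧ c ≤ e by omega]
  · rw [show PySem.List.pyRange e (c-1) (-1) = [] from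
        PySem.List.pyRange_neg_one_eq_nil (by omega)]
    simp only [List.foldl_nil]
    rw [f_of_gt c e f1 f2 (by omega)]
    simp [PySem.Dict.getD_empty]
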